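-- pv_equiv track=rewrite | github.com/Daeell/AlGORITM-STUDY | programmers/92342/scw.py | solution
-- ===== SOURCE A (Python) =====
-- from itertools import product # permutation, combination 등처럼 순열을 만들어주는 모듈
--
-- def solution(n, info):
--     answer=[-1]
--     info.reverse() # info 순서는 0점부터 ~ 10 점 순으로 변경
--     max_score=0
--     for score_board in product((True, False), repeat=11): # 11칸의 리스트를 True False 로 채운 모든 경우의 수를 줌
--
--         shoot_count = sum(info[i]+1 for i in range(11) if score_board[i]) # Ryan이 이길 수 있는 화살 개수
--
--         if shoot_count<=n: # Ryan이 이길 수 있는 화살 개수가 쏠수 있는 화살개수 이하 일 경우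
--             apeach_score = sum(i for i in range(11) if not score_board[i] and info[i]) # 이때 appeach의 점수를 보고
--             ryan_score = sum(i for i in range(11) if score_board[i]) # ryan의 점수를 보고
--             diff_score = ryan_score - apeach_score # 둘의 차를 계산하고
--
--             if diff_score > max_score: # 그 차이가 최대인지 확인하고
--                 max_score = diff_score
--                 answer = [info[i]+1 if score_board[i] else 0 for i in range(11)] # 그때의 answer list를 저장
--                 answer[0] += n-shoot_count # 남은 화살 개수를 0번칸에 넣어줌 (가장 낮은 점수를 더 많이 맞춘 경우)
--
--     answer.reverse() # 10에서 0점 순으로 뒤집어주고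
--     return answer
-- ===== SOURCE B (Python) =====
-- def solution(n, info):
--     info.reverse()  # same in-place reversal as A; indices now mean scores 0..10
--     best = [0, [-1]]  # [best diff, best board (scores 0..10)]
--
--     def dfs(i, arrows, ryan, apeach, board):
--         if i == 11:
--             if arrows >= 0 and ryan - apeach > best[0]:
--                 best[0] = ryan - apeach
--                 best[1] = [board[0] + arrows] + board[1:]
--             return
--         # Ryan takes target i (needs info[i]+1 arrows), tried first
--         dfs(i + 1, arrows - (info[i] + 1), ryan + i, apeach, board + [info[i] + 1])
--         # Ryan concedes target i
--         dfs(i + 1, arrows, ryan, apeach + (i if info[i] else 0), board + [0])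
--
--     dfs(0, n, 0, 0, [])
--     ans = best[1][:]
--     ans.reverse()
--     return ans
-- ===== Notes on version B (the rewrite author's own statement) =====
-- stated objective: alternative
-- what changed: Replaces the itertools.product enumeration with per-board filtered re-summation by a recursive DFS over target indices 0..10 that carries remaining arrows, both scores and the board incrementally (shoot branch before concede, strict > at the leaf, same in-place info.reverse()).
import Mathlib
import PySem

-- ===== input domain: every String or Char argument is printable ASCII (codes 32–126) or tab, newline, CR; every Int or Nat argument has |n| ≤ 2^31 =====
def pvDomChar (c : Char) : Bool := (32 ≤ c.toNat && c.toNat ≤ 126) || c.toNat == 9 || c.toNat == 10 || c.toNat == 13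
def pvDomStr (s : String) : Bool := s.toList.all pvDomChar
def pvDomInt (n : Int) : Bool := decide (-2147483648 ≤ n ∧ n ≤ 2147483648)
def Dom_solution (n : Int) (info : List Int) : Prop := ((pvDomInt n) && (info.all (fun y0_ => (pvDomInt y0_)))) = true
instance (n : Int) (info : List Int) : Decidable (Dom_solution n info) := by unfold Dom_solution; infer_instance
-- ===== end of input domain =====

-- B replaces A's itertools.product enumeration with per-board re-summation by a recursive DFS
-- carrying arrows/scores/board incrementally; same algorithmic cost ("alternative").
-- Both A and B reverse `info` in place (same observable side effect); the theorems are about the return value.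


-- ===== PORT A =====
-- product((True, False), repeat=k), in itertools order (leftmost slot varies slowest, True first)
def boards : Nat → List (List Bool)
  | 0 => [[]]
  | k+1 => [true, false].flatMap (fun b => (boards k).map (fun t => b :: t))

def solution (n : Int) (info : List Int) : List Int :=
  let rinfo := info.reverse
  let g : Nat → Int := fun i => rinfo.getD i 0   -- info[i] after the in-place reverse (in range under Pre_)
  let step : Int × List Int → List Bool → Int × List Int := fun st b =>
    let shoot : Int := ((List.range 11).filter (fun i => b.getD i false)).foldl (fun s i => s + (g i + 1)) 0
    if shoot ≤ n then
      let apeach : Int := ((List.range 11).filter (fun i => !(b.getD i false) && (g i != 0))).foldl (fun s (i : Nat) => s + (i : Int)) 0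
      let ryan : Int := ((List.range 11).filter (fun i => b.getD i false)).foldl (fun s (i : Nat) => s + (i : Int)) 0
      let diff := ryan - apeach
      if diff > st.1 then
        let ans := (List.range 11).map (fun i => if b.getD i false then g i + 1 else 0)
        let ans := match ans with
          | [] => ([] : List Int)
          | a :: rest => (a + (n - shoot)) :: rest   -- answer[0] += n - shoot_count
        (diff, ans)
      else st
    else st
  ((boards 11).foldl step (0, [-1])).2.reverse

-- ===== PORT B =====
-- dfs(i, arrows, ryan, apeach, board); structural recursion on rem = 11 - i
def dfsB (g : Nat → Int) : Nat → Nat → Int → Int → Int → List Int → Int × List Int → Int × List Int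
  | 0, _, arrows, ryan, apeach, board, st =>
      if 0 ≤ arrows ∧ ryan - apeach > st.1 then
        (ryan - apeach, match board with
          | [] => []
          | a :: r => (a + arrows) :: r)
      else st
  | rem+1, i, arrows, ryan, apeach, board, st =>
      let st' := dfsB g rem (i+1) (arrows - (g i + 1)) (ryan + (i : Int)) apeach (board ++ [g i + 1]) st
      dfsB g rem (i+1) arrows ryan (apeach + (if g i != 0 then (i : Int) else 0)) (board ++ [0]) st'

def solution_alt (n : Int) (info : List Int) : List Int :=
  let rinfo := info.reverse
  let g : Nat → Int := fun i => rinfo.getD i 0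
  ((dfsB g 11 0 n 0 0 [] (0, [-1])).2).reverse

-- ===== PRECONDITION & SPEC =====
-- Pre_ excludes exactly the inputs where Python A raises IndexError: fewer than 11 targets (info[i] for i in range(11)).
def Pre_solution (n : Int) (info : List Int) : Prop := 11 ≤ info.length
instance (n : Int) (info : List Int) : Decidable (Pre_solution n info) := by unfold Pre_solution; infer_instance
def pvWitness_solution : Int × List Int := (5, [2, 1, 1, 1, 0, 0, 0, 0, 0, 0, 0])

def Spec_solution (n : Int) (info : List Int) (out : List Int) : Prop := out = solution_alt n info
instance (n : Int) (info : List Int) (out : List Int) : Decidable (Spec_solution n info out) := by unfold Spec_solution; infer_instance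

-- ===== CLAIM (what is proved, stated in full; the proofs are below) =====
def Claim_equal_solution : Prop := ∀ (n : Int) (info : List Int), Dom_solution n info → Pre_solution n info → Spec_solution n info (solution n info)

-- ===== LEMMAS AND PROOFS =====

-- the leaf update of the DFS, shared shape
def leafB (arrows ryan apeach : Int) (board : List Int) (st : Int × List Int) : Int × List Int :=
  if 0 ≤ arrows ∧ ryan - apeach > st.1 then
    (ryan - apeach, match board with
      | [] => []
      | a :: r => (a + arrows) :: r)
  else st

-- dfsB with the remaining choices made explicit as a list of booleans
def stepG (g : Nat → Int) : List Bool → Nat → Int → Int → Int → List Int → Int × List Int → Int × List Int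
  | [], _, arrows, ryan, apeach, board, st => leafB arrows ryan apeach board st
  | b :: bs, i, arrows, ryan, apeach, board, st =>
      if b then stepG g bs (i+1) (arrows - (g i + 1)) (ryan + (i : Int)) apeach (board ++ [g i + 1]) st
      else stepG g bs (i+1) arrows ryan (apeach + (if g i != 0 then (i : Int) else 0)) (board ++ [0]) st

-- recursive accumulators (closed forms of the DFS state)
def accS (F : Bool → Nat → Int) : List Bool → Nat → Int
  | [], _ => 0
  | b :: bs, i => F b i + accS F bs (i+1)

def accL (G : Bool → Nat → Int) : List Bool → Nat → List Int
  | [], _ => []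
  | b :: bs, i => G b i :: accL G bs (i+1)

lemma boards_length : ∀ (k : Nat), ∀ bs ∈ boards k, bs.length = k := by
  intro k
  induction k with
  | zero => intro bs h; simp [boards] at h; simp [h]
  | succ k ih =>
      intro bs h
      simp [boards] at h
      rcases h with ⟨t, ht, rfl⟩ | ⟨t, ht, rfl⟩ <;> simp [ih t ht]

lemma dfs_eq_stepG (g : Nat → Int) : ∀ (rem i : Nat) (arrows ryan apeach : Int) (board : List Int) (st : Int × List Int),
    dfsB g rem i arrows ryan apeach board st
      = (boards rem).foldl (fun st bs => stepG g bs i arrows ryan apeach board st) st := by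
  intro rem
  induction rem with
  | zero => intro i a r p bd st; simp [dfsB, boards, stepG, leafB]
  | succ rem ih =>
      intro i a r p bd st
      simp only [dfsB, boards, List.flatMap_cons, List.flatMap_nil, List.append_nil,
        List.foldl_append, List.foldl_map]
      rw [ih, ih]
      simp [stepG]

lemma stepG_closed (g : Nat → Int) : ∀ (bs : List Bool) (i : Nat) (arrows ryan apeach : Int) (board : List Int) (st : Int × List Int),
    stepG g bs i arrows ryan apeach board st
      = leafB (arrows - accS (fun b j => if b then g j + 1 else 0) bs i)
              (ryan + accS (fun b j => if b then (j : Int) else 0) bs i)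
              (apeach + accS (fun b j => if !b && (g j != 0) then (j : Int) else 0) bs i)
              (board ++ accL (fun b j => if b then g j + 1 else 0) bs i) st := by
  intro bs
  induction bs with
  | nil => intro i a r p bd st; simp [stepG, accS, accL]
  | cons b bs ih =>
      intro i a r p bd st
      cases b with
      | true =>
          show stepG g bs (i+1) (a - (g i + 1)) (r + (i : Int)) p (bd ++ [g i + 1]) st = _
          rw [ih]
          have e1 : a - (g i + 1) - accS (fun b j => if b then g j + 1 else 0) bs (i+1)
              = a - accS (fun b j => if b then g j + 1 else 0) (true :: bs) i := by
            simp [accS]; try ring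
          have e2 : r + (i : Int) + accS (fun b j => if b then (j : Int) else 0) bs (i+1)
              = r + accS (fun b j => if b then (j : Int) else 0) (true :: bs) i := by
            simp [accS]; try ring
          have e3 : p + accS (fun b j => if !b && (g j != 0) then (j : Int) else 0) bs (i+1)
              = p + accS (fun b j => if !b && (g j != 0) then (j : Int) else 0) (true :: bs) i := by
            simp [accS]; try ring
          have e4 : (bd ++ [g i + 1]) ++ accL (fun b j => if b then g j + 1 else 0) bs (i+1)
              = bd ++ accL (fun b j => if b then g j + 1 else 0) (true :: bs) i := by
            simp [accL]
          rw [e1, e2, e3, e4]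
      | false =>
          show stepG g bs (i+1) a r (p + (if g i != 0 then (i : Int) else 0)) (bd ++ [0]) st = _
          rw [ih]
          have e1 : a - accS (fun b j => if b then g j + 1 else 0) bs (i+1)
              = a - accS (fun b j => if b then g j + 1 else 0) (false :: bs) i := by
            simp [accS]; try ring
          have e2 : r + accS (fun b j => if b then (j : Int) else 0) bs (i+1)
              = r + accS (fun b j => if b then (j : Int) else 0) (false :: bs) i := by
            simp [accS]; try ring
          have e3 : p + (if g i != 0 then (i : Int) else 0) + accS (fun b j => if !b && (g j != 0) then (j : Int) else 0) bs (i+1)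
              = p + accS (fun b j => if !b && (g j != 0) then (j : Int) else 0) (false :: bs) i := by
            simp [accS]; try ring
          have e4 : (bd ++ [0]) ++ accL (fun b j => if b then g j + 1 else 0) bs (i+1)
              = bd ++ accL (fun b j => if b then g j + 1 else 0) (false :: bs) i := by
            simp [accL]
          rw [e1, e2, e3, e4]

-- A's filtered range-sums equal the recursive accumulators
lemma range_filter_sum_acc (P : Bool → Nat → Bool) (F : Nat → Int) :
    ∀ (bs : List Bool) (i : Nat),
      ((((List.range bs.length).filter (fun j => P (bs.getD j false) (i + j))).map (fun j => F (i + j))).sum)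
        = accS (fun b j => if P b j then F j else 0) bs i := by
  intro bs
  induction bs with
  | nil => intro i; simp [accS]
  | cons b bs ih =>
      intro i
      rw [List.length_cons, List.range_succ_eq_map]
      rw [List.filter_cons]
      have hmap : (List.map Nat.succ (List.range bs.length)).filter
            (fun j => P ((b :: bs).getD j false) (i + j))
          = List.map Nat.succ ((List.range bs.length).filter (fun j => P (bs.getD j false) ((i+1) + j))) := by
        rw [List.filter_map]
        congr 1
        apply List.filter_congr
        intro j _
        have hj : i + Nat.succ j = (i + 1) + j := by omega
        simp [Function.comp, hj]
      by_cases hb : P ((b :: bs).getD 0 false) (i + 0)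
      · rw [if_pos hb]
        simp only [List.map_cons, List.sum_cons, hmap, List.map_map]
        have : ((List.range bs.length).filter (fun j => P (bs.getD j false) ((i+1) + j))).map
              ((fun j => F (i + j)) ∘ Nat.succ)
            = ((List.range bs.length).filter (fun j => P (bs.getD j false) ((i+1) + j))).map
              (fun j => F ((i+1) + j)) := by
          apply List.map_congr_left; intro j _
          have hj : i + Nat.succ j = (i + 1) + j := by omega
          simp [Function.comp, hj]
        rw [this, ih]
        simp only [List.getD_cons_zero, Nat.add_zero] at hb
        simp [accS, hb]
      · rw [if_neg hb]
        simp only [hmap, List.map_map]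
        have : ((List.range bs.length).filter (fun j => P (bs.getD j false) ((i+1) + j))).map
              ((fun j => F (i + j)) ∘ Nat.succ)
            = ((List.range bs.length).filter (fun j => P (bs.getD j false) ((i+1) + j))).map
              (fun j => F ((i+1) + j)) := by
          apply List.map_congr_left; intro j _
          have hj : i + Nat.succ j = (i + 1) + j := by omega
          simp [Function.comp, hj]
        rw [this, ih]
        simp only [List.getD_cons_zero, Nat.add_zero] at hb
        simp [accS, hb]

-- A's answer list equals the recursive board accumulator
lemma range_map_acc (G : Bool → Nat → Int) :
    ∀ (bs : List Bool) (i : Nat),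
      (List.range bs.length).map (fun j => G (bs.getD j false) (i + j))
        = accL G bs i := by
  intro bs
  induction bs with
  | nil => intro i; simp [accL]
  | cons b bs ih =>
      intro i
      rw [List.length_cons, List.range_succ_eq_map, List.map_cons, List.map_map]
      have : (List.range bs.length).map ((fun j => G ((b :: bs).getD j false) (i + j)) ∘ Nat.succ)
          = (List.range bs.length).map (fun j => G (bs.getD j false) ((i+1) + j)) := by
        apply List.map_congr_left; intro j _
        have hj : i + Nat.succ j = (i + 1) + j := by omega
        simp [Function.comp, hj]
      rw [this, ih]
      simp [accL]

-- ===== VERDICT (by name: the statement is the Claim_ definition above) =====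
set_option maxRecDepth 8192 in
theorem solution_spec : Claim_equal_solution := by
  intro n info _ _
  unfold Spec_solution solution solution_alt
  simp only []
  rw [dfs_eq_stepG]
  congr 2
  apply PySem.List.foldl_congr_mem
  intro st bs hbs
  dsimp only
  have hb : bs.length = 11 := boards_length 11 bs hbs
  set g : Nat → Int := fun i => (info.reverse).getD i 0 with hg
  have h1 := range_filter_sum_acc (fun b _ => b) (fun j => g j + 1) bs 0
  have h2 := range_filter_sum_acc (fun b j => !b && (g j != 0)) (fun j => (j : Int)) bs 0
  have h3 := range_filter_sum_acc (fun b _ => b) (fun j => (j : Int)) bs 0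
  have h4 := range_map_acc (fun b j => if b then g j + 1 else 0) bs 0
  simp only [Nat.zero_add] at h1 h2 h3 h4
  have H1 : ((List.range bs.length).filter (fun i => bs.getD i false)).foldl (fun s i => s + (g i + 1)) 0
      = accS (fun b j => if b then g j + 1 else 0) bs 0 := by
    rw [PySem.List.foldl_add]; simpa using h1
  have H2 : ((List.range bs.length).filter (fun i => !(bs.getD i false) && (g i != 0))).foldl (fun s (i : Nat) => s + (i : Int)) 0
      = accS (fun b j => if !b && (g j != 0) then (j : Int) else 0) bs 0 := by
    rw [PySem.List.foldl_add]; simpa using h2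
  have H3 : ((List.range bs.length).filter (fun i => bs.getD i false)).foldl (fun s (i : Nat) => s + (i : Int)) 0
      = accS (fun b j => if b then (j : Int) else 0) bs 0 := by
    rw [PySem.List.foldl_add]; simpa using h3
  rw [stepG_closed]
  unfold leafB
  rw [show (11:Nat) = bs.length from hb.symm]
  rw [H1, H2, H3, h4]
  simp only [List.nil_append, zero_add]
  split_ifs with hA hB hC <;> first
    | rfl
    | (exfalso; omega)
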